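-- pv_equiv track=rewrite | github.com/raulsalyano/technicaltest | technicaltest.py | get_answered_unanswered
-- ===== SOURCE A (Python) =====
-- def get_answered_unanswered(data):
--     answered = 0
--     unanswered = 0
--     for item in data['items']:
--         if 'is_answered' in item:
--             if item['is_answered']:
--                 answered += 1
--             else:
--                 unanswered += 1
--     return answered, unanswered
-- ===== SOURCE B (Python) =====
-- def _tally(items):
--     # divide and conquer: count halves independently and add the pairs
--     n = len(items)
--     if n == 0:
--         return (0, 0)
--     if n == 1:
--         item = items[0]
--         if 'is_answered' in item:
--             return (1, 0) if item['is_answered'] else (0, 1)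
--         return (0, 0)
--     a1, u1 = _tally(items[:n // 2])
--     a2, u2 = _tally(items[n // 2:])
--     return (a1 + a2, u1 + u2)
--
-- def get_answered_unanswered(data):
--     return _tally(list(data['items']))
-- ===== Notes on version B (the rewrite author's own statement) =====
-- stated objective: alternative
-- what changed: Replaces A's single left-to-right scan with two scalar accumulators by a divide-and-conquer tally: the item list is split in halves, each half is counted recursively, and the two (answered, unanswered) pairs are added.
import Mathlib
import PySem

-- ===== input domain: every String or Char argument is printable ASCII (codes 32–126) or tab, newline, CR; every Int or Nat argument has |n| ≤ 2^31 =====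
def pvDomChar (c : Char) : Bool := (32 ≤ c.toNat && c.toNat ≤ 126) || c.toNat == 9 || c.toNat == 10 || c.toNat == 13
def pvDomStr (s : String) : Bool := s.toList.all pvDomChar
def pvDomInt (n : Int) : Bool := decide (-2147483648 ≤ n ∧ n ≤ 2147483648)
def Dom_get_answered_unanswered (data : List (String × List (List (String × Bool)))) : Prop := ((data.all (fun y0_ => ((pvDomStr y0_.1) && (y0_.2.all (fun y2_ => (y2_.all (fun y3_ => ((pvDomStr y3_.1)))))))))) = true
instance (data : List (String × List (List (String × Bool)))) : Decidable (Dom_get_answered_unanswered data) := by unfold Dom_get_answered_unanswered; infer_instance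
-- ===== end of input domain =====

-- B replaces A's single left-to-right scan with two accumulators by a divide-and-conquer tally
-- (split in halves, count each half recursively, add the pairs); objective: alternative.

-- ===== PORT A =====
-- for item in data['items']: if 'is_answered' in item: if item[...]: answered += 1 else: unanswered += 1
def get_answered_unanswered (data : List (String × List (List (String × Bool)))) : Int × Int :=
  (((PySem.Dict.mk data).get? "items").getD []).foldl
    (fun (acc : Int × Int) item =>
      match (PySem.Dict.mk item).get? "is_answered" with
      | none => acc
      | some b => if b then (acc.1 + 1, acc.2) else (acc.1, acc.2 + 1))
    (0, 0)

-- ===== PORT B =====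
-- _tally: n = len(items); base cases for 0 and 1; else add tallies of items[:n//2] and items[n//2:].
-- Python slices items[:k] / items[k:] with 0 ≤ k ≤ n are exactly List.take k / List.drop k.
def pvTally (items : List (List (String × Bool))) : Int × Int :=
  match items with
  | [] => (0, 0)
  | [item] =>
    match (PySem.Dict.mk item).get? "is_answered" with
    | none => (0, 0)
    | some b => if b then (1, 0) else (0, 1)
  | x :: y :: rest =>
    let items := x :: y :: rest
    let n := items.length
    let p1 := pvTally (items.take (n / 2))
    let p2 := pvTally (items.drop (n / 2))
    (p1.1 + p2.1, p1.2 + p2.2)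
termination_by items.length
decreasing_by
  · simp; omega
  · simp; omega

def get_answered_unanswered_alt (data : List (String × List (List (String × Bool)))) : Int × Int :=
  pvTally (((PySem.Dict.mk data).get? "items").getD [])

-- ===== PRECONDITION & SPEC =====
-- Pre_ excludes exactly the inputs where data has no 'items' key, on which Python A raises KeyError.
def Pre_get_answered_unanswered (data : List (String × List (List (String × Bool)))) : Prop :=
  "items" ∈ data.map Prod.fst
instance (data : List (String × List (List (String × Bool)))) : Decidable (Pre_get_answered_unanswered data) := by unfold Pre_get_answered_unanswered; infer_instance

def pvWitness_get_answered_unanswered : (List (String × List (List (String × Bool)))) :=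
  [("items", [[("is_answered", true)], [("q", false)], [("is_answered", false)]])]

def Spec_get_answered_unanswered (data : List (String × List (List (String × Bool)))) (out : Int × Int) : Prop := out = get_answered_unanswered_alt data
instance (data : List (String × List (List (String × Bool)))) (out : Int × Int) : Decidable (Spec_get_answered_unanswered data out) := by unfold Spec_get_answered_unanswered; infer_instance

-- ===== CLAIM (what is proved, stated in full; the proofs are below) =====
def Claim_equal_get_answered_unanswered : Prop := ∀ (data : List (String × List (List (String × Bool)))), Dom_get_answered_unanswered data → Pre_get_answered_unanswered data → Spec_get_answered_unanswered data (get_answered_unanswered data)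

-- ===== LEMMAS AND PROOFS =====

-- A's loop body, named for the lemmas
def pvStep (acc : Int × Int) (item : List (String × Bool)) : Int × Int :=
  match (PySem.Dict.mk item).get? "is_answered" with
  | none => acc
  | some b => if b then (acc.1 + 1, acc.2) else (acc.1, acc.2 + 1)

-- shifting the accumulator out of A's fold
lemma foldl_step_shift (items : List (List (String × Bool))) (a u : Int) :
    items.foldl pvStep (a, u)
      = (a + (items.foldl pvStep (0, 0)).1, u + (items.foldl pvStep (0, 0)).2) := by
  induction items generalizing a u with
  | nil => simp
  | cons item rest ih =>
    simp only [List.foldl_cons]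
    cases h : (PySem.Dict.mk item).get? "is_answered" with
    | none =>
      rw [show pvStep (a, u) item = (a, u) by simp [pvStep, h],
          show pvStep (0, 0) item = (0, 0) by simp [pvStep, h]]
      exact ih a u
    | some b =>
      cases b with
      | true =>
        rw [show pvStep (a, u) item = (a + 1, u) by simp [pvStep, h],
            show pvStep (0, 0) item = (1, 0) by simp [pvStep, h]]
        rw [ih (a + 1) u, ih 1 0]
        simp only [Prod.mk.injEq]; constructor <;> ring
      | false =>
        rw [show pvStep (a, u) item = (a, u + 1) by simp [pvStep, h],
            show pvStep (0, 0) item = (0, 1) by simp [pvStep, h]]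
        rw [ih a (u + 1), ih 0 1]
        simp only [Prod.mk.injEq]; constructor <;> ring

-- A's fold is additive over append
lemma foldl_step_append (l1 l2 : List (List (String × Bool))) :
    (l1 ++ l2).foldl pvStep (0, 0)
      = ((l1.foldl pvStep (0, 0)).1 + (l2.foldl pvStep (0, 0)).1,
         (l1.foldl pvStep (0, 0)).2 + (l2.foldl pvStep (0, 0)).2) := by
  rw [List.foldl_append]
  rcases h : l1.foldl pvStep (0, 0) with ⟨a, u⟩
  rw [foldl_step_shift]

-- the divide-and-conquer tally computes exactly A's fold
lemma pvTally_eq_foldl (items : List (List (String × Bool))) :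
    pvTally items = items.foldl pvStep (0, 0) := by
  induction items using pvTally.induct with
  | case1 => simp [pvTally]
  | case2 item h => simp [pvTally, pvStep, h]
  | case3 item h => simp [pvTally, pvStep, h]
  | case4 item b h hb =>
    simp only [Bool.not_eq_true] at hb; subst hb
    simp [pvTally, pvStep, h]
  | case5 =>
    rename_i x y rest items n ihTake ihDrop
    rw [pvTally]
    rw [ihTake, ihDrop]
    conv_rhs => rw [← List.take_append_drop (((x :: y :: rest).length) / 2) (x :: y :: rest)]
    rw [foldl_step_append]

-- ===== VERDICT (by name: the statement is the Claim_ definition above) =====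
theorem get_answered_unanswered_spec : Claim_equal_get_answered_unanswered := by
  intro data _ _
  show _ = _
  rw [get_answered_unanswered, get_answered_unanswered_alt, pvTally_eq_foldl]
  rfl
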